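-- pv_equiv track=rewrite | github.com/debitCredit/advent-of-code | 2024/day09/part2.py | find_spaces
-- ===== SOURCE A (Python) =====
-- def find_spaces(lst, size):
--     space, spaces = [], []
--     for i, x in enumerate(lst):
--         if x == '.':
--             space.append(i)
--         elif space:
--             if len(space) >= size:
--                 spaces.append(space)
--             space = []
--     if space and len(space) >= size:
--         spaces.append(space)
--     return spaces
-- ===== SOURCE B (Python) =====
-- def find_spaces(lst, size):
--     spaces = []
--     n = len(lst)
--     i = 0
--     while i < n:
--         if lst[i] == '.':
--             j = i
--             while j < n and lst[j] == '.':
--                 j += 1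
--             if j - i >= size:
--                 spaces.append(list(range(i, j)))
--             i = j
--         else:
--             i += 1
--     return spaces
-- ===== Notes on version B (the rewrite author's own statement) =====
-- stated objective: alternative
-- what changed: Replaces the stateful single pass with a pending-run buffer and a post-loop flush by a two-pointer index scan that, at each '.', advances a second pointer to the end of the run and emits list(range(i, j)) directly, so no accumulator and no trailing flush exist.
import Mathlib
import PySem

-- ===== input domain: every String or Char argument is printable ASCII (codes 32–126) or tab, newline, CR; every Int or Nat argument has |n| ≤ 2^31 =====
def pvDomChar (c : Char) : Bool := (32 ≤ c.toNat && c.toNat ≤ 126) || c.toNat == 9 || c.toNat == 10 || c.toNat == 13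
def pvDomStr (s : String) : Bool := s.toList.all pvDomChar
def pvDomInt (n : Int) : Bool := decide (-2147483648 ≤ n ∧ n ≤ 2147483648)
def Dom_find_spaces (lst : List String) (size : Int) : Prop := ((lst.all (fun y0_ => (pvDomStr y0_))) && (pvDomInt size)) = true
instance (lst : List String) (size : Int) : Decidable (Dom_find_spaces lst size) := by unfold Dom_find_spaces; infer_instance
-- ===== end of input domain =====

-- B is an alternative decomposition: a two-pointer scan emitting each run of '.' directly
-- (no pending-run accumulator, no post-loop flush); return values are identical to A's.

-- ===== PORT A =====
-- the loop body of A's `for i, x in enumerate(lst)`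
def aStep (size : Int) (st : List Int × List (List Int)) (p : Int × String) : List Int × List (List Int) :=
  if p.2 = "." then (st.1 ++ [p.1], st.2)
  else if st.1 ≠ [] then
    (if size ≤ (st.1.length : Int) then ([], st.2 ++ [st.1]) else ([], st.2))
  else st

-- A's trailing `if space and len(space) >= size: spaces.append(space)`
def aFlush (size : Int) (st : List Int × List (List Int)) : List (List Int) :=
  if st.1 ≠ [] ∧ size ≤ (st.1.length : Int) then st.2 ++ [st.1] else st.2

def find_spaces (lst : List String) (size : Int) : List (List Int) :=
  aFlush size ((PySem.List.enumerate lst 0).foldl (aStep size) ([], []))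

-- ===== PORT B =====
-- B's inner `while j < n and lst[j] == '.': j += 1` : length of the leading run of "."
def bRun : List String → Nat
  | [] => 0
  | x :: rest => if x = "." then bRun rest + 1 else 0

-- B's outer while-loop over index i; on a '.', the run has length bRun rest + 1
-- and the scan resumes past it (drop), exactly as `i = j` does.
def bGo (size : Int) (xs : List String) (i : Int) : List (List Int) :=
  match xs with
  | [] => []
  | x :: rest =>
    if x = "." then
      let k : Nat := bRun rest + 1
      (if size ≤ (k : Int) then [PySem.List.pyRange i (i + (k : Int)) 1] else []) ++
        bGo size (rest.drop (bRun rest)) (i + (k : Int))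
    else bGo size rest (i + 1)
termination_by xs.length
decreasing_by
  all_goals simp [List.length_drop]

def find_spaces_alt (lst : List String) (size : Int) : List (List Int) := bGo size lst 0

-- ===== PRECONDITION & SPEC =====
def Spec_find_spaces (lst : List String) (size : Int) (out : List (List Int)) : Prop := out = find_spaces_alt lst size
instance (lst : List String) (size : Int) (out : List (List Int)) : Decidable (Spec_find_spaces lst size out) := by unfold Spec_find_spaces; infer_instance

-- ===== CLAIM (what is proved, stated in full; the proofs are below) =====
def Claim_equal_find_spaces : Prop := ∀ (lst : List String) (size : Int), Dom_find_spaces lst size → Spec_find_spaces lst size (find_spaces lst size)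

-- ===== LEMMAS AND PROOFS =====

-- after dropping the leading run of '.', the list is empty or starts with a non-'.'
lemma bRun_drop_head (xs : List String) :
    xs.drop (bRun xs) = [] ∨ ∃ y r2, xs.drop (bRun xs) = y :: r2 ∧ y ≠ "." := by
  induction xs with
  | nil => left; rfl
  | cons x rest ih =>
    by_cases h : x = "."
    · simpa [bRun, h] using ih
    · right; exact ⟨x, rest, by simp [bRun, h], h⟩

lemma bGo_nil (size : Int) (i : Int) : bGo size [] i = [] := by
  rw [bGo.eq_def]

lemma bGo_cons_dot (size : Int) (x : String) (rest : List String) (i : Int) (h : x = ".") :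
    bGo size (x :: rest) i =
      (if size ≤ ((bRun rest + 1 : Nat) : Int) then
        [PySem.List.pyRange i (i + ((bRun rest + 1 : Nat) : Int)) 1] else []) ++
        bGo size (rest.drop (bRun rest)) (i + ((bRun rest + 1 : Nat) : Int)) := by
  rw [bGo.eq_def]
  simp [h]

lemma bGo_cons_not (size : Int) (x : String) (rest : List String) (i : Int) (h : x ≠ ".") :
    bGo size (x :: rest) i = bGo size rest (i + 1) := by
  rw [bGo.eq_def]
  simp [h]

-- A's loop absorbs a leading run of '.' into the pending `space` buffer
lemma absorb (size : Int) (xs : List String) :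
    ∀ (i : Int) (space : List Int) (spaces : List (List Int)),
    (PySem.List.enumerate xs i).foldl (aStep size) (space, spaces) =
      (PySem.List.enumerate (xs.drop (bRun xs)) (i + (bRun xs : Int))).foldl (aStep size)
        (space ++ PySem.List.pyRange i (i + (bRun xs : Int)) 1, spaces) := by
  induction xs with
  | nil => intro i space spaces; simp [bRun, PySem.List.pyRange_one_eq_nil]
  | cons x rest ih =>
    intro i space spaces
    by_cases h : x = "."
    · rw [PySem.List.enumerate_cons, List.foldl_cons]
      have hstep : aStep size (space, spaces) (i, x) = (space ++ [i], spaces) := by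
        simp [aStep, h]
      rw [hstep, ih (i + 1) (space ++ [i]) spaces]
      have hk : bRun (x :: rest) = bRun rest + 1 := by simp [bRun, h]
      have hcast : i + ((bRun (x :: rest) : Nat) : Int) = (i + 1) + (bRun rest : Int) := by
        rw [hk]; push_cast; ring
      have hdrop : (x :: rest).drop (bRun (x :: rest)) = rest.drop (bRun rest) := by
        rw [hk]; rfl
      have hrange : space ++ [i] ++ PySem.List.pyRange (i + 1) ((i + 1) + (bRun rest : Int)) 1
          = space ++ PySem.List.pyRange i ((i + 1) + (bRun rest : Int)) 1 := by
        rw [PySem.List.pyRange_one_cons (show i < (i + 1) + (bRun rest : Int) by omega)]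
        rw [List.append_assoc]
        rfl
      rw [hdrop, hcast, hrange]
    · have hk : bRun (x :: rest) = 0 := by simp [bRun, h]
      simp [hk, PySem.List.pyRange_one_eq_nil (le_refl i)]

-- main invariant: flushing A's loop from an empty buffer yields spaces ++ B's scan
lemma main_inv (size : Int) : ∀ (n : Nat) (xs : List String), xs.length ≤ n →
    ∀ (i : Int) (spaces : List (List Int)),
    aFlush size ((PySem.List.enumerate xs i).foldl (aStep size) ([], spaces)) = spaces ++ bGo size xs i := by
  intro n
  induction n with
  | zero =>
    intro xs hx i spaces
    have hxs : xs = [] := by cases xs with | nil => rfl | cons a b => simp at hx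
    subst hxs; simp [aFlush, bGo_nil]
  | succ n ih =>
    intro xs hx i spaces
    match xs with
    | [] => simp [aFlush, bGo_nil]
    | x :: rest =>
      by_cases h : x = "."
      · rw [PySem.List.enumerate_cons, List.foldl_cons]
        have hstep : aStep size (([] : List Int), spaces) (i, x) = ([i], spaces) := by
          simp [aStep, h]
        rw [hstep, absorb size rest (i + 1) [i] spaces]
        have hrun : ([i] ++ PySem.List.pyRange (i + 1) ((i + 1) + (bRun rest : Int)) 1)
            = PySem.List.pyRange i ((i + 1) + (bRun rest : Int)) 1 := by
          rw [PySem.List.pyRange_one_cons (show i < (i + 1) + (bRun rest : Int) by omega)]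
          rfl
        have hne : PySem.List.pyRange i ((i + 1) + (bRun rest : Int)) 1 ≠ [] := by
          rw [PySem.List.pyRange_one_cons (show i < (i + 1) + (bRun rest : Int) by omega)]
          simp
        have hlen : (((PySem.List.pyRange i ((i + 1) + (bRun rest : Int)) 1).length : Nat) : Int)
            = (bRun rest : Int) + 1 := by
          rw [PySem.List.length_pyRange_one]
          have : ((i + 1) + (bRun rest : Int) - i) = (bRun rest : Int) + 1 := by ring
          rw [this]
          omega
        have hB : bGo size (x :: rest) i =
            (if size ≤ (bRun rest : Int) + 1 then [PySem.List.pyRange i ((i + 1) + (bRun rest : Int)) 1] else [])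
              ++ bGo size (rest.drop (bRun rest)) ((i + 1) + (bRun rest : Int)) := by
          rw [bGo_cons_dot size x rest i h]
          have hc : ((((bRun rest + 1 : Nat)) : Int)) = (bRun rest : Int) + 1 := by push_cast; ring
          have hc2 : i + ((bRun rest : Int) + 1) = (i + 1) + (bRun rest : Int) := by ring
          simp only [hc, hc2]
        rw [hrun, hB]
        rcases bRun_drop_head rest with hnil | ⟨y, r2, hdrop, hy⟩
        · rw [hnil]
          simp only [PySem.List.enumerate_nil, List.foldl_nil]
          rw [bGo_nil]
          unfold aFlush
          by_cases hc : size ≤ (bRun rest : Int) + 1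
          · rw [if_pos ⟨hne, by rw [hlen]; exact hc⟩, if_pos hc]; simp
          · rw [if_neg (by rw [hlen] at *; tauto), if_neg hc]; simp
        · rw [hdrop, PySem.List.enumerate_cons, List.foldl_cons]
          have hlr2 : r2.length ≤ n := by
            have h1 := congrArg List.length hdrop
            rw [List.length_drop] at h1
            simp only [List.length_cons] at h1 hx
            omega
          have hB2 : bGo size (y :: r2) ((i + 1) + (bRun rest : Int))
              = bGo size r2 (((i + 1) + (bRun rest : Int)) + 1) :=
            bGo_cons_not size y r2 _ hy
          rw [hB2]
          by_cases hc : size ≤ (bRun rest : Int) + 1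
          · have hstep2 : aStep size (PySem.List.pyRange i ((i + 1) + (bRun rest : Int)) 1, spaces)
                (((i + 1) + (bRun rest : Int)), y)
                = ([], spaces ++ [PySem.List.pyRange i ((i + 1) + (bRun rest : Int)) 1]) := by
              simp only [aStep]
              rw [if_neg hy, if_pos (by simpa using hne), if_pos (by rw [hlen]; exact hc)]
            rw [hstep2, ih r2 hlr2, if_pos hc]
            simp
          · have hstep2 : aStep size (PySem.List.pyRange i ((i + 1) + (bRun rest : Int)) 1, spaces)
                (((i + 1) + (bRun rest : Int)), y) = ([], spaces) := by
              simp only [aStep]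
              rw [if_neg hy, if_pos (by simpa using hne), if_neg (by rw [hlen]; exact hc)]
            rw [hstep2, ih r2 hlr2, if_neg hc]
            simp
      · rw [PySem.List.enumerate_cons, List.foldl_cons]
        have hstep : aStep size (([] : List Int), spaces) (i, x) = ([], spaces) := by
          simp [aStep, h]
        rw [hstep, ih rest (by simp at hx; omega), bGo_cons_not size x rest i h]

-- ===== VERDICT (by name: the statement is the Claim_ definition above) =====
theorem find_spaces_spec : Claim_equal_find_spaces := by
  intro lst size _
  unfold Spec_find_spaces find_spaces find_spaces_alt
  simpa using main_inv size lst.length lst (le_refl _) 0 []
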